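-- pv_equiv track=rewrite | github.com/mzmmmm/Py_Algorithms | Numerical Analysis/Interpolation1.py | get_param_dfs
-- ===== SOURCE A (Python) =====
-- def is_legal(a,length):
--     for i in range(len(a)-1):
--         if a[i]>=a[i+1] or a[i]>length-1:
--             return 0
--     if(a[-1] > length-1):
--         return 0
--     return 1
--
-- def count_mount(p,a):#计算组合
--     b=1
--     pt=0
--     for i in range(len(p)):
--         if(pt >= len(a)):
--             break
--         if(a[pt]==i):
--             b *= p[i]
--             pt+=1
--     return b
--
-- def get_param_dfs(points,a,num):#num表示轮到第几个a位dfs了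
--     x=0
--     b=list(a)
--     b[num - 1] += 1
--     if(is_legal(b,len(points))):#位置合法
--         x+=count_mount(points,b)
--         for i in range(num):
--             x+=get_param_dfs(points,b,num-i)
--         return x
--     return 0
-- ===== SOURCE B (Python) =====
-- def _legal(b, L):
--     return all(x < y for x, y in zip(b, b[1:])) and b[-1] <= L - 1
--
-- def _weight(points, b):
--     # multiply the points at the listed indices, stopping at the first
--     # index that is out of order or out of range
--     w, pos = 1, 0
--     for t in b:
--         if t < pos or t >= len(points):
--             break
--         w *= points[t]
--         pos = t + 1
--     return w
--
-- def get_param_dfs(points, a, num):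
--     L = len(points)
--     total = 0
--     stack = [(list(a), num)]
--     while stack:
--         cur, k = stack.pop()
--         b = list(cur)
--         b[k - 1] += 1
--         if _legal(b, L):
--             total += _weight(points, b)
--             for m in range(1, k + 1):
--                 stack.append((b, m))
--     return total
-- ===== Notes on version B (the rewrite author's own statement) =====
-- stated objective: alternative
-- what changed: The recursive DFS is replaced by an explicit-stack worklist loop; legality is re-expressed as one strictly-increasing-and-capped test instead of is_legal's indexed scan, and count_mount's pointer scan over all of points is replaced by a walk over the tuple itself that multiplies the points at the listed indices and stops at the first out-of-order or out-of-range index.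
import Mathlib
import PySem

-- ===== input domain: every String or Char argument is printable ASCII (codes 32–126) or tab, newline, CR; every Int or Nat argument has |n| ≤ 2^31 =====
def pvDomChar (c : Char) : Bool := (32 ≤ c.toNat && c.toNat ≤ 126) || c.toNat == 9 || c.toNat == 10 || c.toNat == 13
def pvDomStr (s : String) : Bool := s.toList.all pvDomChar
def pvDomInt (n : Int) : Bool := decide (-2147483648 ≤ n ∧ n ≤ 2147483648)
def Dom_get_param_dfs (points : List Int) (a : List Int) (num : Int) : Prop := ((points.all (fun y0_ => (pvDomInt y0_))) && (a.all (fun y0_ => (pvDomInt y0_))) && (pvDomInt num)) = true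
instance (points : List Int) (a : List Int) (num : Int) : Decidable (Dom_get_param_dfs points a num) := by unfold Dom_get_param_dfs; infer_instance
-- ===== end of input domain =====

-- B replaces A's recursive DFS by an explicit-stack worklist loop: legality becomes one
-- strictly-increasing-and-capped test, and the weight of a tuple is computed by walking
-- the tuple itself (multiplying the points at the listed indices, stopping at the first
-- out-of-order or out-of-range index) instead of scanning all of points with a pointer.

-- ===== PORT A =====

def legalLoop : List Int → Int → Bool
  | x :: y :: rest, length => if x ≥ y || x > length - 1 then false else legalLoop (y :: rest) length
  | _, _ => true

def is_legal (a : List Int) (length : Int) : Int :=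
  if legalLoop a length then
    if PySem.List.pyGetD a (-1) 0 > length - 1 then 0 else 1
  else 0

def cmGo : List Int → List Int → Int → Int → Int
  | [], _, _, b => b
  | _ :: _, [], _, b => b
  | p :: ps, a0 :: arest, i, b =>
    if a0 == i then cmGo ps arest (i + 1) (b * p) else cmGo ps (a0 :: arest) (i + 1) b

def count_mount (p : List Int) (a : List Int) : Int := cmGo p a 0 1

def pvMeasure (L : Int) (a : List Int) : Nat := (a.map (fun v => (L - v).toNat)).sum

theorem pvPyIdx_lt (n : Nat) (j : Int) (i : Nat) (h : PySem.List.pyIdx? n j = some i) : i < n := by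
  unfold PySem.List.pyIdx? at h
  split_ifs at h <;> simp_all <;> omega

theorem pvPySetSome {xs : List Int} {j : Int} {v : Int} {b : List Int}
    (h : PySem.List.pySet? xs j v = some b) :
    ∃ i : Nat, i < xs.length ∧ b = xs.set i v ∧ PySem.List.pyGetD xs j 0 = xs.getD i 0 := by
  unfold PySem.List.pySet? at h
  cases hidx : PySem.List.pyIdx? xs.length j with
  | none => simp [hidx] at h
  | some i =>
    have hi : i < xs.length := pvPyIdx_lt _ _ _ hidx
    simp only [hidx, Option.map_some, Option.some.injEq] at h
    refine ⟨i, hi, h.symm, ?_⟩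
    simp [PySem.List.pyGetD, PySem.List.pyGet?, hidx, List.getD]

theorem pvSumMapSetLt (f : Int → Nat) : ∀ (a : List Int) (i : Nat) (v : Int),
    i < a.length → f v < f (a.getD i 0) → ((a.set i v).map f).sum < (a.map f).sum := by
  intro a
  induction a with
  | nil => intro i v hi; simp at hi
  | cons x rest ih =>
    intro i v hi hf
    cases i with
    | zero =>
      simp only [List.set_cons_zero, List.map_cons, List.sum_cons]
      simp only [List.getD_cons_zero] at hf
      omega
    | succ n =>
      simp only [List.set_cons_succ, List.map_cons, List.sum_cons]
      have := ih n v (by simpa using hi) (by simpa using hf)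
      omega

theorem pvIsLegalNeZero (b : List Int) (L : Int) (h : is_legal b L ≠ 0) :
    legalLoop b L = true ∧ PySem.List.pyGetD b (-1) 0 ≤ L - 1 := by
  unfold is_legal at h
  split_ifs at h <;> simp_all <;> omega

theorem pvLegalLoopAllLe : ∀ (b : List Int) (L : Int), legalLoop b L = true →
    PySem.List.pyGetD b (-1) 0 ≤ L - 1 → ∀ x ∈ b, x ≤ L - 1 := by
  intro b
  induction b with
  | nil => intro L _ _ x hx; cases hx
  | cons x rest ih =>
    intro L h1 h2 z hz
    cases rest with
    | nil =>
      simp [PySem.List.pyGetD, PySem.List.pyGet?_neg_one] at h2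
      simp at hz; omega
    | cons y rest2 =>
      simp only [legalLoop] at h1
      split_ifs at h1 with hc
      simp only [Bool.or_eq_true, decide_eq_true_eq, not_or, ge_iff_le, not_le, not_lt] at hc
      have h2' : PySem.List.pyGetD (y :: rest2) (-1) 0 ≤ L - 1 := by
        simpa [PySem.List.pyGetD, PySem.List.pyGet?_neg_one, List.getLast?_cons_cons] using h2
      rcases List.mem_cons.1 hz with hz' | hz'
      · have hy := ih L h1 h2' y (by simp)
        omega
      · exact ih L h1 h2' z hz'

def get_param_dfs (points : List Int) (a : List Int) (num : Int) : Int :=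
  match hset : PySem.List.pySet? a (num - 1) (PySem.List.pyGetD a (num - 1) 0 + 1) with
  | none => 0
  | some b =>
    if hleg : is_legal b (points.length : Int) ≠ 0 then
      (List.range num.toNat).foldl
        (fun x (i : Nat) => x + get_param_dfs points b (num - (i : Int))) (count_mount points b)
    else 0
termination_by pvMeasure (points.length : Int) a
decreasing_by
  obtain ⟨i0, hi0, hb, hval⟩ := pvPySetSome hset
  have h12 := pvIsLegalNeZero b _ hleg
  have hall := pvLegalLoopAllLe b _ h12.1 h12.2
  have hmem : (a.getD i0 0 + 1) ∈ b := by
    have hlen : i0 < b.length := by rw [hb]; simpa using hi0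
    have hbv : b[i0]'hlen = a.getD i0 0 + 1 := by
      subst hb; simp only [List.getElem_set_self]; rw [hval]
    exact hbv ▸ List.getElem_mem _
  have hle := hall _ hmem
  subst hb
  rw [hval]
  unfold pvMeasure
  exact pvSumMapSetLt _ _ _ _ hi0 (by omega)

-- ===== PORT B =====
-- B-side helpers
def legalB (b : List Int) (L : Int) : Bool :=
  ((b.zip (PySem.List.slice b (some 1) none)).all (fun p => decide (p.1 < p.2))) &&
    decide (PySem.List.pyGetD b (-1) 0 ≤ L - 1)

def wGo (p : List Int) : List Int → Int → Int → Int
  | [], _, w => w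
  | t :: rest, pos, w =>
    if t < pos ∨ (p.length : Int) ≤ t then w
    else wGo p rest (t + 1) (w * PySem.List.pyGetD p t 0)

def weightB (points : List Int) (b : List Int) : Int := wGo points b 0 1

theorem pvLegalBHeadLe : ∀ (b : List Int) (x : Int) (L : Int),
    legalB (x :: b) L = true → x ≤ L - 1 := by
  intro b
  induction b with
  | nil =>
    intro x L h
    simp [legalB, PySem.List.pyGetD, PySem.List.pyGet?_neg_one] at h
    omega
  | cons y rest ih =>
    intro x L h
    simp only [legalB, PySem.List.slice_from_one, Bool.and_eq_true, List.all_eq_true] at h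
    obtain ⟨hall, hlast⟩ := h
    have hxy : x < y := by
      have := hall (x, y) (by simp [List.zip]) ; simpa using this
    have hy : y ≤ L - 1 := by
      apply ih y L
      simp only [legalB, PySem.List.slice_from_one, Bool.and_eq_true, List.all_eq_true]
      constructor
      · intro p hp
        exact hall p (by simp [List.zip] at hp ⊢; tauto)
      · simpa [PySem.List.pyGetD, PySem.List.pyGet?_neg_one, List.getLast?_cons_cons] using hlast
    omega

theorem pvLegalBAllLe (b : List Int) (L : Int) (h : legalB b L = true) :
    ∀ x ∈ b, x ≤ L - 1 := by
  induction b with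
  | nil => intro x hx; cases hx
  | cons x rest ih =>
    intro z hz
    rcases List.mem_cons.1 hz with hz' | hz'
    · subst hz'; exact pvLegalBHeadLe rest z L h
    · apply ih ?_ z hz'
      cases rest with
      | nil => cases hz'
      | cons y rest2 =>
        simp only [legalB, PySem.List.slice_from_one, Bool.and_eq_true, List.all_eq_true] at h ⊢
        obtain ⟨hall, hlast⟩ := h
        constructor
        · intro p hp
          exact hall p (by simp [List.zip] at hp ⊢; tauto)
        · simpa [PySem.List.pyGetD, PySem.List.pyGet?_neg_one, List.getLast?_cons_cons] using hlast

-- termination weight of one stack entry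
def pvWt (L : Int) (e : List Int × Int) : Nat :=
  (e.1.length + 2) ^ ((e.1.map (fun v => (L - v).toNat)).sum + 1)

theorem pvFoldlConsSum (g : List Int × Int → Nat) (b : List Int) :
    ∀ (l : List Int) (rest : List (List Int × Int)),
      ((l.foldl (fun st m => (b, m) :: st) rest).map g).sum
        = (l.map (fun m => g (b, m))).sum + (rest.map g).sum := by
  intro l
  induction l with
  | nil => intro rest; simp
  | cons m l ih =>
    intro rest
    simp only [List.foldl_cons, List.map_cons, List.sum_cons]
    rw [ih]
    simp [List.map_cons, List.sum_cons]
    omega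

theorem pvPyIdxB_lt (n : Nat) (j : Int) (i : Nat) (h : PySem.List.pyIdx? n j = some i) : i < n := by
  unfold PySem.List.pyIdx? at h
  split_ifs at h <;> simp_all <;> omega

theorem pvPySetSomeB {xs : List Int} {j : Int} {v : Int} {b : List Int}
    (h : PySem.List.pySet? xs j v = some b) :
    ∃ i : Nat, i < xs.length ∧ b = xs.set i v ∧ PySem.List.pyGetD xs j 0 = xs.getD i 0 ∧ j < xs.length := by
  unfold PySem.List.pySet? at h
  cases hidx : PySem.List.pyIdx? xs.length j with
  | none => simp [hidx] at h
  | some i =>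
    have hi : i < xs.length := pvPyIdxB_lt _ _ _ hidx
    simp only [hidx, Option.map_some, Option.some.injEq] at h
    refine ⟨i, hi, h.symm, ?_, ?_⟩
    · simp [PySem.List.pyGetD, PySem.List.pyGet?, hidx, List.getD]
    · unfold PySem.List.pyIdx? at hidx
      split_ifs at hidx <;> simp_all <;> omega

theorem pvSumMapSetLtB (f : Int → Nat) : ∀ (a : List Int) (i : Nat) (v : Int),
    i < a.length → f v < f (a.getD i 0) → ((a.set i v).map f).sum < (a.map f).sum := by
  intro a
  induction a with
  | nil => intro i v hi; simp at hi
  | cons x rest ih =>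
    intro i v hi hf
    cases i with
    | zero =>
      simp only [List.set_cons_zero, List.map_cons, List.sum_cons]
      simp only [List.getD_cons_zero] at hf
      omega
    | succ n =>
      simp only [List.set_cons_succ, List.map_cons, List.sum_cons]
      have := ih n v (by simpa using hi) (by simpa using hf)
      omega

def stackLoop (points : List Int) (L : Int) : List (List Int × Int) → Int → Int
  | [], total => total
  | (cur, k) :: rest, total =>
    match hset : PySem.List.pySet? cur (k - 1) (PySem.List.pyGetD cur (k - 1) 0 + 1) with
    | none => stackLoop points L rest total
    | some b =>
      if hleg : legalB b L = true then
        stackLoop points L ((PySem.List.pyRange 1 (k + 1) 1).foldl (fun st m => (b, m) :: st) rest)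
          (total + weightB points b)
      else stackLoop points L rest total
termination_by st _ => (st.map (pvWt L)).sum
decreasing_by
  · have : 0 < pvWt L (cur, k) := Nat.pow_pos (by omega)
    simp only [List.map_cons, List.sum_cons]
    omega
  · obtain ⟨i0, hi0, hb, hval, hklt⟩ := pvPySetSomeB hset
    have hall := pvLegalBAllLe b L hleg
    have hmem : (cur.getD i0 0 + 1) ∈ b := by
      have hlen : i0 < b.length := by rw [hb]; simpa using hi0
      have hbv : b[i0]'hlen = cur.getD i0 0 + 1 := by
        subst hb; simp only [List.getElem_set_self]; rw [hval]
      exact hbv ▸ List.getElem_mem _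
    have hle := hall _ hmem
    have hMb : (b.map (fun v => (L - v).toNat)).sum < (cur.map (fun v => (L - v).toNat)).sum := by
      subst hb
      rw [hval]
      exact pvSumMapSetLtB _ _ _ _ hi0 (by omega)
    have hblen : b.length = cur.length := by rw [hb]; simp
    simp only [List.map_cons, List.sum_cons]
    rw [pvFoldlConsSum]
    have hconst : ((PySem.List.pyRange 1 (k + 1) 1).map (fun m => pvWt L (b, m))).sum
        = (PySem.List.pyRange 1 (k + 1) 1).length * pvWt L (b, 0) := by
      simp [pvWt, List.map_const', List.sum_replicate, Nat.smul_one_eq_cast]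
    have hlenr : (PySem.List.pyRange 1 (k + 1) 1).length = k.toNat := by
      rw [PySem.List.length_pyRange_one]; omega
    have hkn : k.toNat ≤ cur.length := by omega
    have hwt : k.toNat * pvWt L (b, 0) < pvWt L (cur, k) := by
      unfold pvWt
      calc k.toNat * (b.length + 2) ^ ((b.map (fun v => (L - v).toNat)).sum + 1)
          ≤ cur.length * (cur.length + 2) ^ ((b.map (fun v => (L - v).toNat)).sum + 1) := by
            apply Nat.mul_le_mul hkn
            apply Nat.pow_le_pow_left (by omega)
        _ ≤ cur.length * (cur.length + 2) ^ ((cur.map (fun v => (L - v).toNat)).sum) := by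
            apply Nat.mul_le_mul_left
            apply Nat.pow_le_pow_right (by omega) (by omega)
        _ < (cur.length + 2) * (cur.length + 2) ^ ((cur.map (fun v => (L - v).toNat)).sum) := by
            have hp : 0 < (cur.length + 2) ^ (List.map (fun v => (L - v).toNat) cur).sum :=
              Nat.pow_pos (by omega)
            exact (Nat.mul_lt_mul_right hp).2 (by omega)
        _ = (cur.length + 2) ^ ((cur.map (fun v => (L - v).toNat)).sum + 1) := by
            rw [Nat.pow_succ]; ring
    rw [hconst, hlenr]
    omega
  · have : 0 < pvWt L (cur, k) := Nat.pow_pos (by omega)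
    simp only [List.map_cons, List.sum_cons]
    omega

def get_param_dfs_alt (points : List Int) (a : List Int) (num : Int) : Int :=
  stackLoop points (points.length : Int) [(a, num)] 0


-- ===== PRECONDITION & SPEC =====
-- Pre_ excludes exactly the inputs on which Python A raises IndexError ('b[num - 1] += 1')
def Pre_get_param_dfs (points : List Int) (a : List Int) (num : Int) : Prop :=
  -(a.length : Int) ≤ num - 1 ∧ num - 1 < (a.length : Int)
instance (points : List Int) (a : List Int) (num : Int) : Decidable (Pre_get_param_dfs points a num) := by unfold Pre_get_param_dfs; infer_instance
def pvWitness_get_param_dfs : List Int × List Int × Int := ([2, 3], [0, 1], 2)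

def Spec_get_param_dfs (points : List Int) (a : List Int) (num : Int) (out : Int) : Prop := out = get_param_dfs_alt points a num
instance (points : List Int) (a : List Int) (num : Int) (out : Int) : Decidable (Spec_get_param_dfs points a num out) := by unfold Spec_get_param_dfs; infer_instance

-- ===== CLAIM (what is proved, stated in full; the proofs are below) =====
def Claim_equal_get_param_dfs : Prop := ∀ (points : List Int) (a : List Int) (num : Int), Dom_get_param_dfs points a num → Pre_get_param_dfs points a num → Spec_get_param_dfs points a num (get_param_dfs points a num)

-- ===== LEMMAS AND PROOFS =====

-- the two legality tests agree
theorem pvLegalIff : ∀ (b : List Int) (L : Int), (is_legal b L ≠ 0) ↔ (legalB b L = true) := by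
  intro b
  induction b with
  | nil =>
    intro L
    have h1 : is_legal [] L = if (0 : Int) > L - 1 then 0 else 1 := by
      simp [is_legal, legalLoop, PySem.List.pyGetD, PySem.List.pyGet?, PySem.List.pyIdx?]
    have h2 : legalB [] L = decide ((0 : Int) ≤ L - 1) := by
      simp [legalB, PySem.List.slice_from_one, PySem.List.pyGetD, PySem.List.pyGet?, PySem.List.pyIdx?]
    rw [h1, h2]
    split_ifs with h <;> simp <;> omega
  | cons x rest ih =>
    intro L
    cases rest with
    | nil =>
      have h1 : is_legal [x] L = if x > L - 1 then 0 else 1 := by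
        simp [is_legal, legalLoop, PySem.List.pyGetD, PySem.List.pyGet?_neg_one]
      have h2 : legalB [x] L = decide (x ≤ L - 1) := by
        simp [legalB, PySem.List.slice_from_one, PySem.List.pyGetD, PySem.List.pyGet?_neg_one]
      rw [h1, h2]
      split_ifs with h <;> simp <;> omega
    | cons y rest2 =>
      have hA : is_legal (x :: y :: rest2) L ≠ 0 ↔
          ((x < y ∧ x ≤ L - 1) ∧ is_legal (y :: rest2) L ≠ 0) := by
        by_cases hc : x ≥ y ∨ x > L - 1
        · have hll : legalLoop (x :: y :: rest2) L = false := by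
            simp only [legalLoop]
            rw [if_pos (by rcases hc with h | h <;> simp [h])]
          have : is_legal (x :: y :: rest2) L = 0 := by simp [is_legal, hll]
          simp [this]
          intro h1 h2
          omega
        · have hxy : x < y ∧ x ≤ L - 1 := by omega
          have hll : legalLoop (x :: y :: rest2) L = legalLoop (y :: rest2) L := by
            simp only [legalLoop]
            rw [if_neg (by simp; omega)]
          have hlast : PySem.List.pyGetD (x :: y :: rest2) (-1) 0
              = PySem.List.pyGetD (y :: rest2) (-1) 0 := by
            simp [PySem.List.pyGetD, PySem.List.pyGet?_neg_one, List.getLast?_cons_cons]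
          have : is_legal (x :: y :: rest2) L = is_legal (y :: rest2) L := by
            simp only [is_legal, hll, hlast]
          rw [this]
          tauto
      have hB : legalB (x :: y :: rest2) L = true ↔ (x < y ∧ legalB (y :: rest2) L = true) := by
        simp only [legalB, PySem.List.slice_from_one, List.tail_cons, List.zip_cons_cons,
          List.all_cons, Bool.and_eq_true, decide_eq_true_eq]
        constructor
        · rintro ⟨⟨h1, h2⟩, h3⟩
          refine ⟨h1, h2, ?_⟩
          simpa [PySem.List.pyGetD, PySem.List.pyGet?_neg_one, List.getLast?_cons_cons] using h3
        · rintro ⟨h1, h2, h3⟩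
          refine ⟨⟨h1, h2⟩, ?_⟩
          simpa [PySem.List.pyGetD, PySem.List.pyGet?_neg_one, List.getLast?_cons_cons] using h3
      rw [hA, hB]
      constructor
      · rintro ⟨⟨hxy, _⟩, htail⟩
        exact ⟨hxy, (ih L).1 htail⟩
      · rintro ⟨hxy, htail⟩
        have hy : y ≤ L - 1 := pvLegalBHeadLe rest2 y L htail
        exact ⟨⟨hxy, by omega⟩, (ih L).2 htail⟩

-- count_mount's scan never matches a head that is behind the counter or beyond it
theorem pvCmNoMatch : ∀ (p' : List Int) (t : Int) (rest : List Int) (i acc : Int),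
    (t < i ∨ i + (p'.length : Int) ≤ t) → cmGo p' (t :: rest) i acc = acc := by
  intro p'
  induction p' with
  | nil => intro t rest i acc _; rfl
  | cons x ps ih =>
    intro t rest i acc h
    simp only [cmGo]
    rw [if_neg (by simp only [List.length_cons] at h; simp; push_cast at h ⊢; omega)]
    apply ih
    simp only [List.length_cons] at h
    push_cast at h ⊢
    omega

-- count_mount's pointer scan over p equals B's walk over the tuple itself
theorem pvCmWalk : ∀ (n : Nat) (P : List Int) (i : Nat) (a : List Int) (acc : Int),
    P.length - i ≤ n → cmGo (P.drop i) a (i : Int) acc = wGo P a (i : Int) acc := by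
  intro n
  induction n with
  | zero =>
    intro P i a acc hn
    have hge : P.length ≤ i := by omega
    cases a with
    | nil => cases hd : P.drop i <;> simp [cmGo, wGo, hd]
    | cons t rest =>
      rw [pvCmNoMatch (P.drop i) t rest (i : Int) acc ?_, wGo]
      · rw [if_pos ?_]
        have hdl : (P.drop i).length = 0 := by simp; omega
        by_cases ht : t < (i : Int)
        · left; exact ht
        · right; push_cast; omega
      · have hdl : (P.drop i).length = P.length - i := by simp
        rw [hdl]
        by_cases ht : t < (i : Int)
        · left; exact ht
        · right; push_cast; omega
  | succ n ihn =>
    intro P i a acc hn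
    cases a with
    | nil => cases hd : P.drop i <;> simp [cmGo, wGo, hd]
    | cons t rest =>
      by_cases hstall : t < (i : Int) ∨ (P.length : Int) ≤ t
      · rw [pvCmNoMatch (P.drop i) t rest (i : Int) acc ?_, wGo]
        · rw [if_pos hstall]
        · have hdl : (P.drop i).length = P.length - i := by simp
          rw [hdl]
          by_cases ht : t < (i : Int)
          · left; exact ht
          · right
            rcases hstall with h | h <;> omega
      · push_neg at hstall
        obtain ⟨hti, htl⟩ := hstall
        have hiP : i < P.length := by omega
        rw [List.drop_eq_getElem_cons hiP]
        by_cases heq : t = (i : Int)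
        · have hstep : cmGo (P[i] :: P.drop (i + 1)) (t :: rest) (i : Int) acc
              = cmGo (P.drop (i + 1)) rest ((i : Int) + 1) (acc * P[i]) := by
            simp only [cmGo]
            rw [if_pos (by simp [heq])]
          rw [hstep]
          have hcast : ((i : Int) + 1) = ((i + 1 : Nat) : Int) := by push_cast; ring
          rw [hcast, ihn P (i + 1) rest (acc * P[i]) (by omega)]
          rw [wGo, if_neg (by push_neg; exact ⟨hti, htl⟩)]
          have hpt : PySem.List.pyGetD P t 0 = P[i] := by
            rw [heq]
            simp [PySem.List.pyGetD_natCast, List.getD_eq_getElem?_getD, List.getElem?_eq_getElem hiP]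
          rw [hpt, heq, hcast]
        · have hstep : cmGo (P[i] :: P.drop (i + 1)) (t :: rest) (i : Int) acc
              = cmGo (P.drop (i + 1)) (t :: rest) ((i : Int) + 1) acc := by
            simp only [cmGo]
            rw [if_neg (by simp [heq])]
          rw [hstep]
          have hcast : ((i : Int) + 1) = ((i + 1 : Nat) : Int) := by push_cast; ring
          rw [hcast, ihn P (i + 1) (t :: rest) acc (by omega)]
          have hti1 : ((i + 1 : Nat) : Int) ≤ t := by push_cast; omega
          rw [wGo, wGo, if_neg (by push_neg; constructor; omega; exact htl),
            if_neg (by push_neg; exact ⟨hti, htl⟩)]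
  
-- B's weight equals count_mount on every input
theorem pvWeightEq (points : List Int) (b : List Int) : weightB points b = count_mount points b := by
  unfold weightB count_mount
  have h := pvCmWalk points.length points 0 b 1 (by omega)
  simpa using h.symm

theorem pvFoldlConsSumInt (g : List Int × Int → Int) (b : List Int) :
    ∀ (l : List Int) (rest : List (List Int × Int)),
      ((l.foldl (fun st m => (b, m) :: st) rest).map g).sum
        = (l.map (fun m => g (b, m))).sum + (rest.map g).sum := by
  intro l
  induction l with
  | nil => intro rest; simp
  | cons m l ih =>
    intro rest
    simp only [List.foldl_cons, List.map_cons, List.sum_cons]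
    rw [ih]
    simp only [List.map_cons, List.sum_cons]
    ring

theorem pvSumReflect : ∀ (n : Nat) (g : Int → Int),
    ((List.range n).map (fun (i : Nat) => g ((n : Int) - (i : Int)))).sum
      = ((List.range n).map (fun (j : Nat) => g (1 + (j : Int)))).sum := by
  intro n
  induction n with
  | zero => intro g; simp
  | succ n ih =>
    intro g
    conv_lhs => rw [List.range_succ]
    conv_rhs => rw [List.range_succ_eq_map]
    simp only [List.map_append, List.sum_append, List.map_cons, List.sum_cons, List.map_map,
      List.map_nil, List.sum_nil, Nat.cast_zero]
    have e1 : ((n + 1 : Nat) : Int) - (n : Int) = 1 := by push_cast; ring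
    have e2 : ((List.range n).map (fun (i : Nat) => g (((n + 1 : Nat) : Int) - (i : Int)))).sum
        = ((List.range n).map (fun (i : Nat) => (fun t => g (t + 1)) ((n : Int) - (i : Int)))).sum := by
      apply congrArg
      apply List.map_congr_left
      intro i _
      congr 1
      push_cast
      ring
    rw [e1, e2, ih (fun t => g (t + 1))]
    have e4 : ((List.range n).map ((fun (j : Nat) => g (1 + (j : Int))) ∘ (fun i => i + 1))).sum
        = ((List.range n).map (fun (j : Nat) => (fun t => g (t + 1)) (1 + (j : Int)))).sum := by
      apply congrArg
      apply List.map_congr_left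
      intro j _
      simp only [Function.comp]
      congr 1
    rw [e4]
    simp [add_comm]

theorem pvGetA_none (points a : List Int) (num : Int)
    (h : PySem.List.pySet? a (num - 1) (PySem.List.pyGetD a (num - 1) 0 + 1) = none) :
    get_param_dfs points a num = 0 := by
  rw [get_param_dfs]
  split
  · rfl
  · rename_i b hb
    rw [h] at hb
    cases hb

theorem pvGetA_some_legal (points a b : List Int) (num : Int)
    (h : PySem.List.pySet? a (num - 1) (PySem.List.pyGetD a (num - 1) 0 + 1) = some b)
    (hleg : is_legal b (points.length : Int) ≠ 0) :
    get_param_dfs points a num = count_mount points b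
      + ((List.range num.toNat).map (fun (i : Nat) => get_param_dfs points b (num - (i : Int)))).sum := by
  rw [get_param_dfs]
  split
  · rename_i hb
    rw [h] at hb
    cases hb
  · rename_i b' hb
    rw [h] at hb
    cases hb
    rw [dif_pos hleg]
    exact PySem.List.foldl_add (List.range num.toNat) (fun n => get_param_dfs points b (num - (n : Int))) (count_mount points b)

theorem pvGetA_some_illegal (points a b : List Int) (num : Int)
    (h : PySem.List.pySet? a (num - 1) (PySem.List.pyGetD a (num - 1) 0 + 1) = some b)
    (hleg : ¬ is_legal b (points.length : Int) ≠ 0) :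
    get_param_dfs points a num = 0 := by
  rw [get_param_dfs]
  split
  · rfl
  · rename_i b' hb
    rw [h] at hb
    cases hb
    rw [dif_neg hleg]

theorem pvRangeSumEq (f : Int → Int) (k : Int) :
    ((PySem.List.pyRange 1 (k + 1) 1).map f).sum
      = ((List.range k.toNat).map (fun (i : Nat) => f (k - (i : Int)))).sum := by
  rw [PySem.List.pyRange_one, List.map_map]
  have h1 : (k + 1 - 1 : Int) = k := by ring
  rw [h1]
  by_cases hk : 0 ≤ k
  · obtain ⟨n, rfl⟩ : ∃ n : Nat, k = (n : Int) := ⟨k.toNat, (Int.toNat_of_nonneg hk).symm⟩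
    rw [Int.toNat_natCast]
    have hrefl := (pvSumReflect n f).symm
    rw [← hrefl]
    apply congrArg
    apply List.map_congr_left
    intro j _
    simp [Function.comp]
  · have h0 : k.toNat = 0 := by omega
    rw [h0]
    simp

theorem pvStackLoopEq (points : List Int) : ∀ (st : List (List Int × Int)) (total : Int),
    stackLoop points (points.length : Int) st total
      = total + (st.map (fun e => get_param_dfs points e.1 e.2)).sum := by
  intro st total
  fun_induction stackLoop points ((points.length : Int)) st total with
  | case1 total => simp
  | case2 cur k rest total hset ih =>
    rw [ih, List.map_cons, List.sum_cons, pvGetA_none points cur k hset]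
    ring
  | case3 cur k rest total b hset hleg ih =>
    rw [ih]
    rw [pvFoldlConsSumInt (fun e => get_param_dfs points e.1 e.2) b]
    rw [List.map_cons, List.sum_cons]
    have hW : weightB points b = count_mount points b := pvWeightEq points b
    have hlegA : is_legal b (points.length : Int) ≠ 0 := (pvLegalIff b _).2 hleg
    rw [pvGetA_some_legal points cur b k hset hlegA]
    have hsum : ((PySem.List.pyRange 1 (k + 1) 1).map (fun m => get_param_dfs points b m)).sum
        = ((List.range k.toNat).map (fun (i : Nat) => get_param_dfs points b (k - (i : Int)))).sum :=
      pvRangeSumEq (fun m => get_param_dfs points b m) k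
    have hbeta : ((PySem.List.pyRange 1 (k + 1) 1).map (fun m => (fun e : List Int × Int => get_param_dfs points e.1 e.2) (b, m))).sum
        = ((PySem.List.pyRange 1 (k + 1) 1).map (fun m => get_param_dfs points b m)).sum := rfl
    rw [hbeta, hsum, hW]
    ring
  | case4 cur k rest total b hset hleg ih =>
    rw [ih, List.map_cons, List.sum_cons]
    have hlegA : ¬ is_legal b (points.length : Int) ≠ 0 := fun h => hleg ((pvLegalIff b _).1 h)
    rw [pvGetA_some_illegal points cur b k hset hlegA]
    ring

-- ===== VERDICT (by name: the statement is the Claim_ definition above) =====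
theorem get_param_dfs_spec : Claim_equal_get_param_dfs := by
  intro points a num _ _
  unfold Spec_get_param_dfs get_param_dfs_alt
  rw [pvStackLoopEq]
  simp
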